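-- pv_equiv track=rewrite | github.com/caopulan/OpenTask | skills/opentask/scripts/registry_helper.py | compute_run_status
-- ===== SOURCE A (Python) =====
-- from typing import Any
--
-- TERMINAL_NODE_STATUSES = {"completed", "failed", "skipped"}
--
-- def compute_run_status(current_status: str, nodes: list[dict[str, Any]]) -> str:
--     if current_status in {"paused", "cancelled"}:
--         if all(node["status"] in TERMINAL_NODE_STATUSES for node in nodes):
--             return "failed" if any(node["status"] == "failed" for node in nodes) else "completed"
--         return current_status
--     if all(node["status"] in TERMINAL_NODE_STATUSES for node in nodes):
--         return "failed" if any(node["status"] == "failed" for node in nodes) else "completed"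
--     return "running"
-- ===== SOURCE B (Python) =====
-- TERMINAL_NODE_STATUSES = {"completed", "failed", "skipped"}
--
-- def compute_run_status(current_status, nodes):
--     all_terminal = True
--     any_failed = False
--     for node in nodes:
--         s = node["status"]
--         if s == "failed":
--             any_failed = True
--         elif s not in TERMINAL_NODE_STATUSES:
--             all_terminal = False
--             break
--     if all_terminal:
--         return "failed" if any_failed else "completed"
--     return current_status if current_status in {"paused", "cancelled"} else "running"
-- ===== Notes on version B (the rewrite author's own statement) =====
-- stated objective: simpler
-- what changed: Replaces A's duplicated two-pass all/any checks (repeated in both branches) with a single accumulating pass that tracks all_terminal and any_failed and breaks at the first non-terminal node, deciding once at the end.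
import Mathlib
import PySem

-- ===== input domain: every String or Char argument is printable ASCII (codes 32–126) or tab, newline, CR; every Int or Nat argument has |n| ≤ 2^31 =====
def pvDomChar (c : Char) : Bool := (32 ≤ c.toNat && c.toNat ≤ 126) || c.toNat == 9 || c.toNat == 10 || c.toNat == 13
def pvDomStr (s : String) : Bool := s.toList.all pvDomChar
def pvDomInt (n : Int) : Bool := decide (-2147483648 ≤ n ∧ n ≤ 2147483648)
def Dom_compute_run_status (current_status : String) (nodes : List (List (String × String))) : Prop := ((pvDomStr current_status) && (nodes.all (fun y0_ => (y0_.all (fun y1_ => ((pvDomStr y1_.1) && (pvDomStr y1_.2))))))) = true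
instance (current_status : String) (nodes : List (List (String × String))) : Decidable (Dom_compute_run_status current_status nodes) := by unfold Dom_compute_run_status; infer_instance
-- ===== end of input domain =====

-- B replaces A's duplicated two-pass all/any checks with one accumulating pass that breaks
-- at the first non-terminal node (objective: simpler).

-- ===== PORT A =====
-- node["status"]: first-match lookup in the association list (Python dict access)
def pvGetStatus (n : List (String × String)) : Option String := (PySem.Dict.mk n).get? "status"

def TERMINAL_NODE_STATUSES : List String := ["completed", "failed", "skipped"]

-- all(node["status"] in TERMINAL_NODE_STATUSES for node in nodes); none = KeyError
def pvAllTerminal : List (List (String × String)) → Option Bool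
  | [] => some true
  | n :: rest =>
    match pvGetStatus n with
    | none => none
    | some s => if TERMINAL_NODE_STATUSES.contains s then pvAllTerminal rest else some false

-- any(node["status"] == "failed" for node in nodes); none = KeyError
def pvAnyFailed : List (List (String × String)) → Option Bool
  | [] => some false
  | n :: rest =>
    match pvGetStatus n with
    | none => none
    | some s => if s = "failed" then some true else pvAnyFailed rest

def compute_run_status (current_status : String) (nodes : List (List (String × String))) : String :=
  if current_status = "paused" ∨ current_status = "cancelled" then
    match pvAllTerminal nodes with
    | none => ""        -- KeyError; excluded by Pre_
    | some true =>
      match pvAnyFailed nodes with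
      | none => ""      -- KeyError; excluded by Pre_
      | some b => if b then "failed" else "completed"
    | some false => current_status
  else
    match pvAllTerminal nodes with
    | none => ""        -- KeyError; excluded by Pre_
    | some true =>
      match pvAnyFailed nodes with
      | none => ""      -- KeyError; excluded by Pre_
      | some b => if b then "failed" else "completed"
    | some false => "running"

-- ===== PORT B =====
-- the single pass of Source B: returns (all_terminal, any_failed); none = KeyError
def pvScan : List (List (String × String)) → Bool → Bool → Option (Bool × Bool)
  | [], all_terminal, any_failed => some (all_terminal, any_failed)
  | n :: rest, all_terminal, any_failed =>
    match pvGetStatus n with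
    | none => none
    | some s =>
      if s = "failed" then pvScan rest all_terminal true
      else if TERMINAL_NODE_STATUSES.contains s then pvScan rest all_terminal any_failed
      else some (false, any_failed)   -- break

def compute_run_status_alt (current_status : String) (nodes : List (List (String × String))) : String :=
  match pvScan nodes true false with
  | none => ""          -- KeyError; excluded by Pre_
  | some (all_terminal, any_failed) =>
    if all_terminal then (if any_failed then "failed" else "completed")
    else if current_status = "paused" ∨ current_status = "cancelled" then current_status
    else "running"

-- ===== PRECONDITION & SPEC =====
-- node status with contains-check; false when the key is missing
def pvNodeTerminal (n : List (String × String)) : Bool :=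
  match pvGetStatus n with
  | some s => TERMINAL_NODE_STATUSES.contains s
  | none => false

-- Pre_ excludes exactly the inputs where Python A raises KeyError: every node reached by the
-- short-circuiting scan (all earlier nodes terminal) must carry a "status" key.
def Pre_compute_run_status (current_status : String) (nodes : List (List (String × String))) : Prop :=
  ∀ i, i < nodes.length →
    (∀ j, j < i → pvNodeTerminal (nodes.getD j []) = true) →
    (pvGetStatus (nodes.getD i [])).isSome = true

instance (current_status : String) (nodes : List (List (String × String))) : Decidable (Pre_compute_run_status current_status nodes) := by unfold Pre_compute_run_status; infer_instance

def pvWitness_compute_run_status : String × (List (List (String × String))) :=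
  ("running", [[("status", "completed")], [("status", "failed")]])

def Spec_compute_run_status (current_status : String) (nodes : List (List (String × String))) (out : String) : Prop := out = compute_run_status_alt current_status nodes
instance (current_status : String) (nodes : List (List (String × String))) (out : String) : Decidable (Spec_compute_run_status current_status nodes out) := by unfold Spec_compute_run_status; infer_instance

-- ===== CLAIM (what is proved, stated in full; the proofs are below) =====
def Claim_equal_compute_run_status : Prop := ∀ (current_status : String) (nodes : List (List (String × String))), Dom_compute_run_status current_status nodes → Pre_compute_run_status current_status nodes → Spec_compute_run_status current_status nodes (compute_run_status current_status nodes)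

-- ===== LEMMAS AND PROOFS =====

-- Pre_ ignores current_status; work with the list-only core
def PreL (nodes : List (List (String × String))) : Prop :=
  ∀ i, i < nodes.length →
    (∀ j, j < i → pvNodeTerminal (nodes.getD j []) = true) →
    (pvGetStatus (nodes.getD i [])).isSome = true

lemma preL_cons {n : List (String × String)} {rest : List (List (String × String))}
    (h : PreL (n :: rest)) (ht : pvNodeTerminal n = true) : PreL rest := by
  intro i hi hj
  have := h (i + 1) (by simpa using Nat.succ_lt_succ hi) (by
    intro j hj'
    cases j with
    | zero => simpa using ht
    | succ j => exact hj j (Nat.lt_of_succ_lt_succ hj'))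
  simpa using this

lemma allTerminal_isSome : ∀ (nodes : List (List (String × String))), PreL nodes →
    (pvAllTerminal nodes).isSome = true := by
  intro nodes
  induction nodes with
  | nil => intro _; rfl
  | cons n rest ih =>
    intro h
    have h0 : (pvGetStatus n).isSome = true := by
      have := h 0 (by simp) (by intro j hj; omega)
      simpa using this
    obtain ⟨s, hs⟩ := Option.isSome_iff_exists.mp h0
    by_cases ht : s ∈ TERMINAL_NODE_STATUSES
    · have : pvNodeTerminal n = true := by simp [pvNodeTerminal, hs, ht]
      have := ih (preL_cons h this)
      simpa [pvAllTerminal, hs, ht] using this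
    · simp [pvAllTerminal, hs, ht]

lemma anyFailed_isSome : ∀ (nodes : List (List (String × String))),
    pvAllTerminal nodes = some true → (pvAnyFailed nodes).isSome = true := by
  intro nodes
  induction nodes with
  | nil => intro _; rfl
  | cons n rest ih =>
    intro h
    cases hs : pvGetStatus n with
    | none => simp [pvAllTerminal, hs] at h
    | some s =>
      by_cases ht : s ∈ TERMINAL_NODE_STATUSES
      · by_cases hf : s = "failed"
        · simp [pvAnyFailed, hs, hf]
        · have := ih (by simpa [pvAllTerminal, hs, ht] using h)
          simpa [pvAnyFailed, hs, hf] using this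
      · simp [pvAllTerminal, hs, ht] at h

-- the single pass computes exactly A's two passes
lemma scan_spec : ∀ (nodes : List (List (String × String))) (af : Bool),
    (pvAllTerminal nodes = none → pvScan nodes true af = none) ∧
    (pvAllTerminal nodes = some false → ∃ x, pvScan nodes true af = some (false, x)) ∧
    (∀ b, pvAllTerminal nodes = some true → pvAnyFailed nodes = some b →
      pvScan nodes true af = some (true, af || b)) := by
  intro nodes
  induction nodes with
  | nil =>
    intro af
    refine ⟨by intro h; simp [pvAllTerminal] at h, by intro h; simp [pvAllTerminal] at h, ?_⟩
    intro b h1 h2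
    have hb : b = false := by simpa [pvAnyFailed] using h2.symm
    simp [pvScan, hb]
  | cons n rest ih =>
    intro af
    cases hs : pvGetStatus n with
    | none =>
      refine ⟨?_, ?_, ?_⟩
      · intro _; simp [pvScan, hs]
      · intro h; simp [pvAllTerminal, hs] at h
      · intro b h; simp [pvAllTerminal, hs] at h
    | some s =>
      by_cases hf : s = "failed"
      · have ht : s ∈ TERMINAL_NODE_STATUSES := by
          simp [hf, TERMINAL_NODE_STATUSES]
        refine ⟨?_, ?_, ?_⟩
        · intro h
          simp [pvAllTerminal, hs, ht] at h
          have := (ih true).1 h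
          simpa [pvScan, hs, hf] using this
        · intro h
          simp [pvAllTerminal, hs, ht] at h
          obtain ⟨x, hx⟩ := (ih true).2.1 h
          exact ⟨x, by simpa [pvScan, hs, hf] using hx⟩
        · intro b h1 h2
          simp [pvAllTerminal, hs, ht] at h1
          simp [pvAnyFailed, hs, hf] at h2
          have hb : b = true := by simpa using h2.symm
          obtain ⟨b', hb'⟩ := Option.isSome_iff_exists.mp (anyFailed_isSome rest h1)
          have := (ih true).2.2 b' h1 hb'
          simp [pvScan, hs, hf, hb, this]
      · by_cases ht : s ∈ TERMINAL_NODE_STATUSES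
        · refine ⟨?_, ?_, ?_⟩
          · intro h
            simp [pvAllTerminal, hs, ht] at h
            have := (ih af).1 h
            simpa [pvScan, hs, hf, ht] using this
          · intro h
            simp [pvAllTerminal, hs, ht] at h
            obtain ⟨x, hx⟩ := (ih af).2.1 h
            exact ⟨x, by simpa [pvScan, hs, hf, ht] using hx⟩
          · intro b h1 h2
            simp [pvAllTerminal, hs, ht] at h1
            simp [pvAnyFailed, hs, hf] at h2
            have := (ih af).2.2 b h1 h2
            simpa [pvScan, hs, hf, ht] using this
        · refine ⟨?_, ?_, ?_⟩
          · intro h; simp [pvAllTerminal, hs, ht] at h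
          · intro _; exact ⟨af, by simp [pvScan, hs, hf, ht]⟩
          · intro b h1; simp [pvAllTerminal, hs, ht] at h1

-- ===== VERDICT (by name: the statement is the Claim_ definition above) =====
theorem compute_run_status_spec : Claim_equal_compute_run_status := by
  intro current_status nodes _ hpre
  have hpreL : PreL nodes := fun i hi hj => hpre i hi hj
  unfold Spec_compute_run_status
  have hsome := allTerminal_isSome nodes hpreL
  obtain ⟨t, ht⟩ := Option.isSome_iff_exists.mp hsome
  cases t with
  | false =>
    obtain ⟨x, hx⟩ := (scan_spec nodes false).2.1 ht
    by_cases hc : current_status = "paused" ∨ current_status = "cancelled" <;>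
      simp [compute_run_status, compute_run_status_alt, ht, hx, hc]
  | true =>
    obtain ⟨b, hb⟩ := Option.isSome_iff_exists.mp (anyFailed_isSome nodes ht)
    have hx := (scan_spec nodes false).2.2 b ht hb
    by_cases hc : current_status = "paused" ∨ current_status = "cancelled" <;>
      simp [compute_run_status, compute_run_status_alt, ht, hb, hx, hc]
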